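-- pv_equiv track=rewrite | github.com/yourbteam/memory-knowledge | src/memory_knowledge/admin/analytics.py | _bucket_planning_context
-- ===== SOURCE A (Python) =====
-- def _distinct_sorted(items: list[dict[str, str]], key_name: str) -> list[dict[str, str]]:
--     seen: set[str] = set()
--     result: list[dict[str, str]] = []
--     for item in sorted(items, key=lambda x: x[key_name]):
--         if item[key_name] in seen:
--             continue
--         seen.add(item[key_name])
--         result.append(item)
--     return result
--
-- def _bucket_planning_context(
--     bucket_run_ids: list[int],
--     run_planning_context: dict[int, dict[str, list[dict[str, str]]]],
-- ) -> dict[str, list[dict[str, str]]]: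
--     projects: list[dict[str, str]] = []
--     features: list[dict[str, str]] = []
--     tasks: list[dict[str, str]] = []
--     for run_id in bucket_run_ids:
--         ctx = run_planning_context.get(run_id, {"projects": [], "features": [], "tasks": []})
--         projects.extend(ctx["projects"])
--         features.extend(ctx["features"])
--         tasks.extend(ctx["tasks"])
--     return {
--         "projects": _distinct_sorted(projects, "project_key"),
--         "features": _distinct_sorted(features, "feature_key"),
--         "tasks": _distinct_sorted(tasks, "task_key"),
--     }
-- ===== SOURCE B (Python) =====
-- def _first_sorted(bucket_run_ids, run_planning_context, name, key_name):
--     # one pass: table of the FIRST item seen per key, then a single sort of the distinct items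
--     d = {}
--     for run_id in bucket_run_ids:
--         ctx = run_planning_context.get(run_id)
--         if ctx is None:
--             continue
--         for item in ctx[name]:
--             k = item[key_name]
--             if k not in d:
--                 d[k] = item
--     return sorted(d.values(), key=lambda x: x[key_name])
--
--
-- def _bucket_planning_context(bucket_run_ids, run_planning_context):
--     return {
--         name: _first_sorted(bucket_run_ids, run_planning_context, name, key_name)
--         for name, key_name in (
--             ("projects", "project_key"),
--             ("features", "feature_key"),
--             ("tasks", "task_key"),
--         )
--     }
-- ===== Notes on version B (the rewrite author's own statement) =====
-- stated objective: alternative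
-- what changed: B dedups BEFORE sorting: one pass per category builds a first-occurrence-per-key table straight from the per-run contexts (no intermediate concatenated lists, no seen-set scan after the sort), then a single sort of the distinct items replaces A's sort-everything-then-filter.
import Mathlib
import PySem

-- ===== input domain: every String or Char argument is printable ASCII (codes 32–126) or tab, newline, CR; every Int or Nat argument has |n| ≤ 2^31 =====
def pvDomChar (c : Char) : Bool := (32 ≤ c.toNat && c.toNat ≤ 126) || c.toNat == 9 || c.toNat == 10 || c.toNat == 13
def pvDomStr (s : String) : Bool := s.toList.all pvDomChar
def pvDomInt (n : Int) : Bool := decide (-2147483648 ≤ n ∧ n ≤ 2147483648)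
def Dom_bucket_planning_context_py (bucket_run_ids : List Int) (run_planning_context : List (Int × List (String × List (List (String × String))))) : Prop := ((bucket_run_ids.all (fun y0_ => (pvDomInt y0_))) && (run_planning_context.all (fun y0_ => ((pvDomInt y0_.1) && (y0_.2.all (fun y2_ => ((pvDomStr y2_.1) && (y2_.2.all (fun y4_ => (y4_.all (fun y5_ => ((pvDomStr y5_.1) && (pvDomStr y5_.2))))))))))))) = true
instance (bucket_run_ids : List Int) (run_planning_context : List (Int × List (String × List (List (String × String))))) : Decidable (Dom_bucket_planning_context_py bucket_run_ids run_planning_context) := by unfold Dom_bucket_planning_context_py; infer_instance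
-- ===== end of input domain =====

-- B dedups before sorting (first-occurrence table per key, then one sort of the distinct
-- items) instead of A's sort-everything-then-filter; return values proved equal on Pre_.

-- ===== PORT A =====
-- item[key_name]: getD "" is exact under Pre_ (the key is present on every reached item)
def pvItemKey (keyName : String) (item : List (String × String)) : String :=
  (PySem.Dict.mk item).getD keyName ""

-- _distinct_sorted: stable sort by key, then keep the first item per key via a `seen` set
def pvDistinctSorted (items : List (List (String × String))) (keyName : String) :
    List (List (String × String)) :=
  ((PySem.List.sorted items (pvItemKey keyName) false).foldl
    (fun (st : PySem.Set String × List (List (String × String))) item =>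
      if PySem.Set.contains st.1 (pvItemKey keyName item) then st
      else (PySem.Set.add st.1 (pvItemKey keyName item), st.2 ++ [item]))
    (PySem.Set.empty, [])).2

def pvDefaultCtx : List (String × List (List (String × String))) :=
  [("projects", []), ("features", []), ("tasks", [])]

def bucket_planning_context_py (bucket_run_ids : List Int) (run_planning_context : List (Int × List (String × List (List (String × String))))) : List (String × List (List (String × String))) :=
  let st := bucket_run_ids.foldl
    (fun (st : List (List (String × String)) × List (List (String × String)) × List (List (String × String))) runId =>
      (st.1 ++ (PySem.Dict.mk ((PySem.Dict.mk run_planning_context).getD runId pvDefaultCtx)).getD "projects" [],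
       st.2.1 ++ (PySem.Dict.mk ((PySem.Dict.mk run_planning_context).getD runId pvDefaultCtx)).getD "features" [],
       st.2.2 ++ (PySem.Dict.mk ((PySem.Dict.mk run_planning_context).getD runId pvDefaultCtx)).getD "tasks" []))
    ([], [], [])
  [("projects", pvDistinctSorted st.1 "project_key"),
   ("features", pvDistinctSorted st.2.1 "feature_key"),
   ("tasks", pvDistinctSorted st.2.2 "task_key")]

-- ===== PORT B =====
-- _first_sorted: one pass building the first-item-per-key table, then one sort
def pvFirstSorted (bucket_run_ids : List Int) (run_planning_context : List (Int × List (String × List (List (String × String))))) (name keyName : String) :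
    List (List (String × String)) :=
  let d := bucket_run_ids.foldl
    (fun (d : PySem.Dict String (List (String × String))) runId =>
      match (PySem.Dict.mk run_planning_context).get? runId with
      | none => d
      | some ctx =>
        ((PySem.Dict.mk ctx).getD name []).foldl
          (fun d item =>
            if d.contains (pvItemKey keyName item) then d
            else d.insert (pvItemKey keyName item) item) d)
    PySem.Dict.empty
  PySem.List.sorted d.values (pvItemKey keyName) false

def bucket_planning_context_py_alt (bucket_run_ids : List Int) (run_planning_context : List (Int × List (String × List (List (String × String))))) : List (String × List (List (String × String))) :=
  [("projects", "project_key"), ("features", "feature_key"), ("tasks", "task_key")].map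
    (fun nk => (nk.1, pvFirstSorted bucket_run_ids run_planning_context nk.1 nk.2))

-- ===== PRECONDITION & SPEC =====
def pvItemsOk (keyName : String) (items : List (List (String × String))) : Bool :=
  items.all (fun it => (PySem.Dict.mk it).contains keyName)

def pvCtxOk (ctx : List (String × List (List (String × String)))) : Bool :=
  (PySem.Dict.mk ctx).contains "projects" && (PySem.Dict.mk ctx).contains "features" &&
  (PySem.Dict.mk ctx).contains "tasks" &&
  pvItemsOk "project_key" ((PySem.Dict.mk ctx).getD "projects" []) &&
  pvItemsOk "feature_key" ((PySem.Dict.mk ctx).getD "features" []) &&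
  pvItemsOk "task_key" ((PySem.Dict.mk ctx).getD "tasks" [])

-- Pre_ excludes exactly the KeyError inputs: some reached run context lacks one of the three
-- category keys, or a collected item lacks its category's key (both Pythons raise there).
def Pre_bucket_planning_context_py (bucket_run_ids : List Int) (run_planning_context : List (Int × List (String × List (List (String × String))))) : Prop :=
  (bucket_run_ids.all (fun rid =>
    match (PySem.Dict.mk run_planning_context).get? rid with
    | none => true
    | some ctx => pvCtxOk ctx)) = true

instance (bucket_run_ids : List Int) (run_planning_context : List (Int × List (String × List (List (String × String))))) : Decidable (Pre_bucket_planning_context_py bucket_run_ids run_planning_context) := by unfold Pre_bucket_planning_context_py; infer_instance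

def pvWitness_bucket_planning_context_py : List Int × (List (Int × List (String × List (List (String × String))))) :=
  ([1], [(1, [("projects", [[("project_key", "a")]]), ("features", []), ("tasks", [])])])

def Spec_bucket_planning_context_py (bucket_run_ids : List Int) (run_planning_context : List (Int × List (String × List (List (String × String))))) (out : List (String × List (List (String × String)))) : Prop := out = bucket_planning_context_py_alt bucket_run_ids run_planning_context

instance (bucket_run_ids : List Int) (run_planning_context : List (Int × List (String × List (List (String × String))))) (out : List (String × List (List (String × String)))) : Decidable (Spec_bucket_planning_context_py bucket_run_ids run_planning_context out) := by unfold Spec_bucket_planning_context_py; infer_instance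

-- ===== CLAIM =====
def Claim_equal_bucket_planning_context_py : Prop := ∀ (bucket_run_ids : List Int) (run_planning_context : List (Int × List (String × List (List (String × String))))), Dom_bucket_planning_context_py bucket_run_ids run_planning_context → Pre_bucket_planning_context_py bucket_run_ids run_planning_context → Spec_bucket_planning_context_py bucket_run_ids run_planning_context (bucket_planning_context_py bucket_run_ids run_planning_context)

-- ===== LEMMAS AND PROOFS =====
def pvDedupByKey {α : Type} (key : α → String) : List α → List α
  | [] => []
  | x :: xs => x :: pvDedupByKey key (xs.filter (fun y => key y != key x))
termination_by l => l.length
decreasing_by simpa using Nat.lt_succ_of_le (List.length_filter_le _ _)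

theorem pv_filter_insertBy {α : Type} (key : α → String) (k : String) (x : α) (ys : List α)
    (h : ys.Pairwise (fun a b => key a ≤ key b)) :
    (PySem.List.insertBy (fun a b => decide (key a < key b)) x ys).filter (fun y => key y == k)
      = if key x == k then ys.filter (fun y => key y == k) ++ [x]
        else ys.filter (fun y => key y == k) := by
  induction ys with
  | nil =>
    simp only [PySem.List.insertBy, List.filter_nil, List.filter_cons, List.nil_append]
  | cons y ys ih =>
    simp only [PySem.List.insertBy]
    by_cases hlt : key x < key y
    · have hnil : key x = k → (y :: ys).filter (fun z => key z == k) = [] := by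
        intro hk
        apply List.filter_eq_nil_iff.mpr
        intro z hz
        have hyz : key y ≤ key z := by
          rcases List.mem_cons.mp hz with hz1 | hz2
          · rw [hz1]
          · exact (List.pairwise_cons.mp h).1 z hz2
        simp only [beq_iff_eq]
        intro hzk
        rw [hzk, ← hk] at hyz
        exact absurd (lt_of_lt_of_le hlt hyz) (lt_irrefl _)
      rw [if_pos (by simpa using hlt)]
      by_cases hk : key x = k
      · simp [hk, hnil hk]
      · simp [List.filter_cons, hk]
    · rw [if_neg (by simpa using hlt)]
      have ih' := ih (List.pairwise_cons.mp h).2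
      simp only [List.filter_cons, ih']
      by_cases hy : key y = k <;> by_cases hk : key x = k <;> simp [hy, hk]

theorem pv_filter_sorted {α : Type} (key : α → String) (k : String) (xs : List α) :
    (PySem.List.sorted xs key).filter (fun y => key y == k)
      = xs.filter (fun y => key y == k) := by
  induction xs using List.reverseRecOn with
  | nil => simp [PySem.List.sorted_eq_foldl_insertBy]
  | append_singleton xs x ih =>
    have hsx : PySem.List.sorted (xs ++ [x]) key
        = PySem.List.insertBy (fun a b => decide (key a < key b)) x (PySem.List.sorted xs key) := by
      rw [PySem.List.sorted_eq_foldl_insertBy, PySem.List.sorted_eq_foldl_insertBy,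
        List.foldl_append]
      rfl
    rw [hsx, pv_filter_insertBy key k x _ (PySem.List.sorted_pairwise xs key),
      List.filter_append]
    by_cases hk : key x = k <;> simp [hk, ih]

theorem pv_dedup_sublist_aux {α : Type} (key : α → String) :
    ∀ (n : Nat) (l : List α), l.length ≤ n → List.Sublist (pvDedupByKey key l) l := by
  intro n
  induction n with
  | zero =>
    intro l h
    rw [List.length_eq_zero_iff.mp (Nat.le_zero.mp h)]
    simp [pvDedupByKey]
  | succ n ih =>
    intro l h
    match l with
    | [] => simp [pvDedupByKey]
    | x :: xs =>
      rw [pvDedupByKey]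
      refine List.Sublist.cons₂ x ?_
      exact (ih _ (le_trans (List.length_filter_le _ _) (by simpa using h))).trans
        List.filter_sublist

theorem pv_dedup_sublist {α : Type} (key : α → String) (l : List α) :
    List.Sublist (pvDedupByKey key l) l :=
  pv_dedup_sublist_aux key l.length l le_rfl

theorem pv_pairwise_ne_aux {α : Type} (key : α → String) :
    ∀ (n : Nat) (l : List α), l.length ≤ n →
      (pvDedupByKey key l).Pairwise (fun a b => key a ≠ key b) := by
  intro n
  induction n with
  | zero =>
    intro l h
    rw [List.length_eq_zero_iff.mp (Nat.le_zero.mp h)]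
    simp [pvDedupByKey]
  | succ n ih =>
    intro l h
    match l with
    | [] => simp [pvDedupByKey]
    | x :: xs =>
      rw [pvDedupByKey]
      refine List.pairwise_cons.mpr ⟨?_, ih _ (le_trans (List.length_filter_le _ _) (by simpa using h))⟩
      intro b hb
      have hbf := (pv_dedup_sublist key _).mem hb
      have := List.of_mem_filter hbf
      simp only [bne_iff_ne, ne_eq] at this
      exact fun e => this e.symm

theorem pv_pairwise_ne {α : Type} (key : α → String) (l : List α) :
    (pvDedupByKey key l).Pairwise (fun a b => key a ≠ key b) :=
  pv_pairwise_ne_aux key l.length l le_rfl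

theorem pv_nodup_dedup {α : Type} (key : α → String) (l : List α) :
    (pvDedupByKey key l).Nodup :=
  (pv_pairwise_ne key l).imp (fun h e => h (by rw [e]))

theorem pv_find?_filter_ne {α : Type} (key : α → String) (k k' : String) (hk : k ≠ k')
    (l : List α) :
    (l.filter (fun y => key y != k')).find? (fun y => key y == k)
      = l.find? (fun y => key y == k) := by
  induction l with
  | nil => simp
  | cons a l ih =>
    by_cases ha' : key a = k'
    · rw [List.filter_cons_of_neg (by simp [ha']),
        List.find?_cons_of_neg (by simp [ha']; exact fun e => hk e.symm)]
      exact ih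
    · rw [List.filter_cons_of_pos (by simp [ha'])]
      by_cases hak : key a = k
      · rw [List.find?_cons_of_pos (by simp [hak]), List.find?_cons_of_pos (by simp [hak])]
      · rw [List.find?_cons_of_neg (by simp [hak]), List.find?_cons_of_neg (by simp [hak])]
        exact ih

theorem pv_mem_dedup_iff_aux {α : Type} (key : α → String) :
    ∀ (n : Nat) (l : List α), l.length ≤ n → ∀ (x : α),
      (x ∈ pvDedupByKey key l ↔ l.find? (fun y => key y == key x) = some x) := by
  intro n
  induction n with
  | zero =>
    intro l h x
    rw [List.length_eq_zero_iff.mp (Nat.le_zero.mp h)]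
    simp [pvDedupByKey]
  | succ n ih =>
    intro l h x
    match l with
    | [] => simp [pvDedupByKey]
    | a :: xs =>
      rw [pvDedupByKey]
      have hlen : (xs.filter (fun y => key y != key a)).length ≤ n :=
        le_trans (List.length_filter_le _ _) (by simpa using h)
      by_cases ha : key a = key x
      · rw [List.find?_cons_of_pos (by simp [ha])]
        simp only [List.mem_cons, Option.some.injEq]
        constructor
        · rintro (h1 | h1)
          · exact h1.symm
          · exfalso
            have hbf := (pv_dedup_sublist key _).mem h1
            have := List.of_mem_filter hbf
            simp [ha] at this
        · intro h1; exact Or.inl h1.symm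
      · rw [List.find?_cons_of_neg (by simp [ha])]
        rw [← pv_find?_filter_ne key (key x) (key a) (fun e => ha e.symm) xs]
        simp only [List.mem_cons, ih _ hlen x]
        constructor
        · rintro (h1 | h1)
          · exact absurd rfl (by rw [h1] at ha; exact ha)
          · exact h1
        · exact fun h1 => Or.inr h1

theorem pv_mem_dedup_iff {α : Type} (key : α → String) (l : List α) (x : α) :
    x ∈ pvDedupByKey key l ↔ l.find? (fun y => key y == key x) = some x :=
  pv_mem_dedup_iff_aux key l.length l le_rfl x

theorem pv_sorted_dedup {α : Type} (key : α → String) (l : List α) :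
    PySem.List.sorted (pvDedupByKey key l) key
      = pvDedupByKey key (PySem.List.sorted l key) := by
  apply PySem.List.sorted_eq_of_perm_of_pairwise_lt
  · refine (List.perm_ext_iff_of_nodup (pv_nodup_dedup _ _) (pv_nodup_dedup _ _)).mpr ?_
    intro a
    rw [pv_mem_dedup_iff, pv_mem_dedup_iff]
    have h1 : (PySem.List.sorted l key).find? (fun y => key y == key a)
        = l.find? (fun y => key y == key a) := by
      rw [← List.head?_filter, ← List.head?_filter, pv_filter_sorted]
    rw [h1]
  · have hle : (pvDedupByKey key (PySem.List.sorted l key)).Pairwise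
        (fun a b => key a ≤ key b) :=
      (PySem.List.sorted_pairwise l key).sublist (pv_dedup_sublist key _)
    exact (hle.and (pv_pairwise_ne key _)).imp
      (fun h => lt_of_le_of_ne h.1 h.2)

theorem pv_foldA {α : Type} (key : α → String) :
    ∀ (l : List α) (seen : PySem.Set String) (res : List α),
      (l.foldl (fun (st : PySem.Set String × List α) item =>
          if PySem.Set.contains st.1 (key item) then st
          else (PySem.Set.add st.1 (key item), st.2 ++ [item])) (seen, res)).2
        = res ++ pvDedupByKey key (l.filter (fun y => !(PySem.Set.contains seen (key y)))) := by
  intro l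
  induction l with
  | nil => simp [pvDedupByKey]
  | cons x l ih =>
    intro seen res
    by_cases hx : PySem.Set.contains seen (key x) = true
    · rw [List.foldl_cons, if_pos hx, ih, List.filter_cons_of_neg (by simpa using hx)]
    · rw [List.foldl_cons, if_neg hx, ih, List.filter_cons_of_pos (by simpa using hx),
        pvDedupByKey, List.filter_filter]
      have hf : (fun y => !(PySem.Set.contains (PySem.Set.add seen (key x)) (key y)))
          = (fun y => (key y != key x) && !(PySem.Set.contains seen (key y))) := by
        funext y
        rw [Bool.eq_iff_iff]
        by_cases h1 : key y = key x <;> by_cases h2 : key y ∈ seen <;>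
          simp [PySem.Set.mem_add, h1, h2]
      rw [hf]
      simp

theorem pv_foldB {α : Type} (key : α → String) :
    ∀ (l : List α) (d : PySem.Dict String α),
      (l.foldl (fun d item =>
          if d.contains (key item) then d else d.insert (key item) item) d).values
        = d.values ++ pvDedupByKey key (l.filter (fun y => !(d.contains (key y)))) := by
  intro l
  induction l with
  | nil => simp [pvDedupByKey]
  | cons x l ih =>
    intro d
    by_cases hx : d.contains (key x) = true
    · rw [List.foldl_cons, if_pos hx, ih, List.filter_cons_of_neg (by simp [hx])]
    · rw [List.foldl_cons, if_neg hx, ih, List.filter_cons_of_pos (by simp [hx]),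
        pvDedupByKey, List.filter_filter]
      have hv : (d.insert (key x) x).values = d.values ++ [x] := by
        have := PySem.Dict.items_insert_of_not_contains d x (by simpa using hx)
        simp [PySem.Dict.values, this]
      have hf : (fun y => !((d.insert (key x) x).contains (key y)))
          = (fun y => (key y != key x) && !(d.contains (key y))) := by
        funext y
        rw [PySem.Dict.contains_insert]
        by_cases h1 : key y = key x <;> simp [bne, h1]
      rw [hv, hf]
      simp

theorem pv_foldl_nested {α β σ : Type} (g : β → List α) (f : σ → α → σ) :
    ∀ (l : List β) (s : σ),
      l.foldl (fun s b => (g b).foldl f s) s = (l.flatMap g).foldl f s := by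
  intro l
  induction l with
  | nil => simp
  | cons b l ih => intro s; simp [List.flatMap_cons, List.foldl_append, ih]

theorem pv_foldl_triple {α β : Type} (gP gF gT : β → List α) :
    ∀ (l : List β) (p f t : List α),
      l.foldl (fun (st : List α × List α × List α) b =>
          (st.1 ++ gP b, st.2.1 ++ gF b, st.2.2 ++ gT b)) (p, f, t)
        = (p ++ l.flatMap gP, f ++ l.flatMap gF, t ++ l.flatMap gT) := by
  intro l
  induction l with
  | nil => simp
  | cons b l ih =>
    intro p f t
    rw [List.foldl_cons, ih]
    simp [List.flatMap_cons, List.append_assoc]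


theorem pv_distinctSorted_eq (items : List (List (String × String))) (kN : String) :
    pvDistinctSorted items kN
      = PySem.List.sorted (pvDedupByKey (pvItemKey kN) items) (pvItemKey kN) := by
  unfold pvDistinctSorted
  rw [pv_foldA (pvItemKey kN)]
  have hfa : (PySem.List.sorted items (pvItemKey kN)).filter
      (fun y => !(PySem.Set.contains PySem.Set.empty (pvItemKey kN y)))
        = PySem.List.sorted items (pvItemKey kN) := by
    simp [PySem.Set.contains, PySem.Set.empty]
  rw [hfa, ← pv_sorted_dedup]
  simp

theorem pv_firstSorted_eq (ids : List Int)
    (rpc : List (Int × List (String × List (List (String × String))))) (name kN : String)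
    (hname : (PySem.Dict.mk pvDefaultCtx).getD name ([] : List (List (String × String))) = []) :
    pvFirstSorted ids rpc name kN
      = PySem.List.sorted (pvDedupByKey (pvItemKey kN)
          (ids.flatMap (fun rid =>
            (PySem.Dict.mk ((PySem.Dict.mk rpc).getD rid pvDefaultCtx)).getD name [])))
          (pvItemKey kN) := by
  unfold pvFirstSorted
  have hbody : (fun (d : PySem.Dict String (List (String × String))) runId =>
      match (PySem.Dict.mk rpc).get? runId with
      | none => d
      | some ctx =>
        ((PySem.Dict.mk ctx).getD name []).foldl
          (fun d item =>
            if d.contains (pvItemKey kN item) then d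
            else d.insert (pvItemKey kN item) item) d)
      = (fun (d : PySem.Dict String (List (String × String))) runId =>
          ((PySem.Dict.mk ((PySem.Dict.mk rpc).getD runId pvDefaultCtx)).getD name []).foldl
            (fun d item =>
              if d.contains (pvItemKey kN item) then d
              else d.insert (pvItemKey kN item) item) d) := by
    funext d rid
    cases h : (PySem.Dict.mk rpc).get? rid with
    | none =>
      rw [PySem.Dict.getD_of_get?_eq_none _ _ h, hname]
      rfl
    | some ctx =>
      rw [PySem.Dict.getD_of_get?_eq_some _ _ h]
  rw [hbody, pv_foldl_nested]
  simp only [pv_foldB (pvItemKey kN)]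
  have hfa : ((ids.flatMap (fun rid =>
      (PySem.Dict.mk ((PySem.Dict.mk rpc).getD rid pvDefaultCtx)).getD name [])).filter
        (fun y => !((PySem.Dict.empty :
            PySem.Dict String (List (String × String))).contains (pvItemKey kN y))))
      = ids.flatMap (fun rid =>
          (PySem.Dict.mk ((PySem.Dict.mk rpc).getD rid pvDefaultCtx)).getD name []) := by
    simp [PySem.Dict.contains_empty]
  rw [hfa]
  simp [PySem.Dict.values, PySem.Dict.empty]

-- ===== VERDICT (by name: the statement is the Claim_ definition above) =====
theorem bucket_planning_context_py_spec : Claim_equal_bucket_planning_context_py := by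
  intro ids rpc _ _
  unfold Spec_bucket_planning_context_py
  unfold bucket_planning_context_py bucket_planning_context_py_alt
  rw [pv_foldl_triple]
  simp only [List.map_cons, List.map_nil, List.nil_append]
  rw [pv_firstSorted_eq ids rpc "projects" "project_key" (by decide),
    pv_firstSorted_eq ids rpc "features" "feature_key" (by decide),
    pv_firstSorted_eq ids rpc "tasks" "task_key" (by decide),
    pv_distinctSorted_eq, pv_distinctSorted_eq, pv_distinctSorted_eq]
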